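-- pv_equiv track=rewrite | github.com/slakumalla-intel/Iperf3validation | iperf3_test_runner.py | _parse_ip_link_stats
-- ===== SOURCE A (Python) =====
-- from typing import Dict, List, Optional
--
-- def _parse_ip_link_stats(text: str) -> Dict[str, int]:
--     # Parse Linux ip -s link blocks for RX/TX errors and dropped fields.
--     rx_errors = rx_dropped = tx_errors = tx_dropped = 0
--     lines = text.splitlines()
--     for idx, line in enumerate(lines):
--         if line.strip().startswith("RX:") and idx + 1 < len(lines):
--             nums = lines[idx + 1].split()
--             if len(nums) >= 4:
--                 rx_errors = int(nums[2])
--                 rx_dropped = int(nums[3])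
--         if line.strip().startswith("TX:") and idx + 1 < len(lines):
--             nums = lines[idx + 1].split()
--             if len(nums) >= 4:
--                 tx_errors = int(nums[2])
--                 tx_dropped = int(nums[3])
--     return {
--         "rx_errors": rx_errors,
--         "rx_dropped": rx_dropped,
--         "tx_errors": tx_errors,
--         "tx_dropped": tx_dropped,
--     }
-- ===== SOURCE B (Python) =====
-- def _parse_ip_link_stats(text: str):
--     # Declarative: pair each line with its successor, filter header pairs, take the last match.
--     lines = text.splitlines()
--     pairs = list(zip(lines, lines[1:]))
--
--     def last_stats(tag):
--         cands = [nxt.split() for hdr, nxt in pairs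
--                  if hdr.strip().startswith(tag) and len(nxt.split()) >= 4]
--         if cands:
--             return int(cands[-1][2]), int(cands[-1][3])
--         return 0, 0
--
--     rx_errors, rx_dropped = last_stats("RX:")
--     tx_errors, tx_dropped = last_stats("TX:")
--     return {
--         "rx_errors": rx_errors,
--         "rx_dropped": rx_dropped,
--         "tx_errors": tx_errors,
--         "tx_dropped": tx_dropped,
--     }
-- ===== Notes on version B (the rewrite author's own statement) =====
-- stated objective: alternative
-- what changed: Replaced A's stateful enumerate-with-look-ahead scan by a declarative pipeline: zip each line with its successor, filter the (header, data) pairs for RX:/TX: with >=4 fields, and parse only the LAST matching pair for each direction (last-write-wins made explicit).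
import Mathlib
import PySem

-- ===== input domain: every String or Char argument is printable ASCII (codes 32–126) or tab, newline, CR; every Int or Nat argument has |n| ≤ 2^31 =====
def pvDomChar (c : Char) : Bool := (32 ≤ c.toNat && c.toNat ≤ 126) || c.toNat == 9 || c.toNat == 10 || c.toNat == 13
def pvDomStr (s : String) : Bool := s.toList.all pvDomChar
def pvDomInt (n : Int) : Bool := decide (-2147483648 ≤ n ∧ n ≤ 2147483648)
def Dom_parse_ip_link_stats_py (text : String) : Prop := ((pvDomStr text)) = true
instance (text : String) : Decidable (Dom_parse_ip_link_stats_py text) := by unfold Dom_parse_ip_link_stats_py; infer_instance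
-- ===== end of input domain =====

-- B replaces A's stateful look-ahead scan by a zip-filter-last pipeline; objective:
-- alternative decomposition of the same linear-time task.

-- ===== PORT A =====
-- A's loop body: enumerate with look-ahead into the full line list.
def pvStepA (lines : List String) (st : Int × Int × Int × Int) (p : Int × String) :
    Int × Int × Int × Int :=
  let idx := p.1
  let line := p.2
  let st1 :=
    if PySem.Str.startswith (PySem.Str.strip line) "RX:" = true ∧ idx + 1 < (lines.length : Int) then
      let nums := PySem.Str.split₀ ((PySem.List.pyGet? lines (idx + 1)).getD "")
      if 4 ≤ nums.length then
        ((PySem.Int.ofStr? ((PySem.List.pyGet? nums 2).getD "")).getD 0,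
         (PySem.Int.ofStr? ((PySem.List.pyGet? nums 3).getD "")).getD 0,
         st.2.2.1, st.2.2.2)
      else st
    else st
  if PySem.Str.startswith (PySem.Str.strip line) "TX:" = true ∧ idx + 1 < (lines.length : Int) then
    let nums := PySem.Str.split₀ ((PySem.List.pyGet? lines (idx + 1)).getD "")
    if 4 ≤ nums.length then
      (st1.1, st1.2.1,
       (PySem.Int.ofStr? ((PySem.List.pyGet? nums 2).getD "")).getD 0,
       (PySem.Int.ofStr? ((PySem.List.pyGet? nums 3).getD "")).getD 0)
    else st1
  else st1

def parse_ip_link_stats_py (text : String) : List (String × Int) :=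
  let lines := PySem.Str.splitlines text
  let st := (PySem.List.enumerate lines 0).foldl (pvStepA lines) (0, 0, 0, 0)
  [("rx_errors", st.1), ("rx_dropped", st.2.1), ("tx_errors", st.2.2.1), ("tx_dropped", st.2.2.2)]

-- ===== PORT B =====
-- Source B's last_stats: filter the (header, next-line) pairs for the tag, parse the last hit.
def pvLastStats (pairs : List (String × String)) (tag : String) : Int × Int :=
  let cands := (pairs.filter (fun p =>
      PySem.Str.startswith (PySem.Str.strip p.1) tag &&
      decide (4 ≤ (PySem.Str.split₀ p.2).length))).map (fun p => PySem.Str.split₀ p.2)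
  match cands.getLast? with      -- cands[-1] guarded by 'if cands'
  | some nums =>
      ((PySem.Int.ofStr? ((PySem.List.pyGet? nums 2).getD "")).getD 0,
       (PySem.Int.ofStr? ((PySem.List.pyGet? nums 3).getD "")).getD 0)
  | none => (0, 0)

def parse_ip_link_stats_py_alt (text : String) : List (String × Int) :=
  let lines := PySem.Str.splitlines text
  let pairs := lines.zip (PySem.List.slice lines (some 1) none)   -- zip(lines, lines[1:])
  let rx := pvLastStats pairs "RX:"
  let tx := pvLastStats pairs "TX:"
  [("rx_errors", rx.1), ("rx_dropped", rx.2), ("tx_errors", tx.1), ("tx_dropped", tx.2)]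

-- ===== PRECONDITION & SPEC =====
-- Pre_ excludes exactly the inputs where Python's int() raises ValueError in A:
-- a line following an RX:/TX: header that has ≥ 4 whitespace fields whose 3rd or 4th field
-- is not a valid Python integer literal.
def Pre_parse_ip_link_stats_py (text : String) : Prop :=
  ∀ i ∈ List.range (PySem.Str.splitlines text).length,
    (PySem.Str.startswith (PySem.Str.strip ((PySem.Str.splitlines text).getD i "")) "RX:" = true ∨
     PySem.Str.startswith (PySem.Str.strip ((PySem.Str.splitlines text).getD i "")) "TX:" = true) →
    i + 1 < (PySem.Str.splitlines text).length →
    4 ≤ (PySem.Str.split₀ ((PySem.Str.splitlines text).getD (i + 1) "")).length →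
    ((PySem.Int.ofStr? ((PySem.Str.split₀ ((PySem.Str.splitlines text).getD (i + 1) "")).getD 2 "")).isSome = true ∧
     (PySem.Int.ofStr? ((PySem.Str.split₀ ((PySem.Str.splitlines text).getD (i + 1) "")).getD 3 "")).isSome = true)
instance (text : String) : Decidable (Pre_parse_ip_link_stats_py text) := by
  unfold Pre_parse_ip_link_stats_py; infer_instance

def pvWitness_parse_ip_link_stats_py : String :=
  "RX: bytes packets errors dropped\n10 20 3 4\nTX: bytes packets errors dropped\n50 60 7 8"

def Spec_parse_ip_link_stats_py (text : String) (out : List (String × Int)) : Prop := out = parse_ip_link_stats_py_alt text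
instance (text : String) (out : List (String × Int)) : Decidable (Spec_parse_ip_link_stats_py text out) := by unfold Spec_parse_ip_link_stats_py; infer_instance

-- ===== CLAIM (what is proved, stated in full; the proofs are below) =====
def Claim_equal_parse_ip_link_stats_py : Prop := ∀ (text : String), Dom_parse_ip_link_stats_py text → Pre_parse_ip_link_stats_py text → Spec_parse_ip_link_stats_py text (parse_ip_link_stats_py text)

-- ===== LEMMAS AND PROOFS =====

-- shared shape: parse the line after a header
def pvParse (s : Int × Int × Int × Int) (q : String) (nl : String) : Int × Int × Int × Int :=
  let nums := PySem.Str.split₀ nl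
  if 4 ≤ nums.length then
    let e := (PySem.Int.ofStr? ((PySem.List.pyGet? nums 2).getD "")).getD 0
    let d := (PySem.Int.ofStr? ((PySem.List.pyGet? nums 3).getD "")).getD 0
    if q = "rx" then (e, d, s.2.2.1, s.2.2.2) else (s.1, s.2.1, e, d)
  else s

def pvHeader (line : String) : Option String :=
  if PySem.Str.startswith (PySem.Str.strip line) "RX:" = true then some "rx"
  else if PySem.Str.startswith (PySem.Str.strip line) "TX:" = true then some "tx"
  else none

-- Reference recursion for A: each line acts using the head of the remainder.
def pvRefA : List String → (Int × Int × Int × Int) → (Int × Int × Int × Int)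
  | [], s => s
  | l :: rest, s =>
    pvRefA rest (match pvHeader l, rest.head? with
                 | some q, some nl => pvParse s q nl
                 | _, _ => s)

theorem pvRX_TX_excl (s : String) (h1 : PySem.Str.startswith s "RX:" = true)
    (h2 : PySem.Str.startswith s "TX:" = true) : False := by
  rw [PySem.Str.startswith_eq, PySem.Chars.startswith_iff] at h1 h2
  obtain ⟨t1, e1⟩ := h1
  obtain ⟨t2, e2⟩ := h2
  rw [← e1] at e2
  simp at e2

theorem pvStepA_eq (pre rest : List String) (l : String) (s : Int × Int × Int × Int) :
    pvStepA (pre ++ l :: rest) s ((pre.length : Int), l) =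
      (match pvHeader l, rest.head? with
       | some q, some nl => pvParse s q nl
       | _, _ => s) := by
  have hlen : ((pre ++ l :: rest).length : Int) = (pre.length : Int) + 1 + (rest.length : Int) := by
    push_cast [List.length_append, List.length_cons]; ring
  cases rest with
  | nil =>
    have hguard : ¬ ((pre.length : Int) + 1 < ((pre ++ l :: ([] : List String)).length : Int)) := by
      rw [hlen]; push_cast [List.length_nil]; omega
    simp only [pvStepA, hguard, and_false, if_false]
    cases h : pvHeader l <;> rfl
  | cons nl rs =>
    have hguard : (pre.length : Int) + 1 < ((pre ++ l :: nl :: rs).length : Int) := by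
      rw [hlen]; push_cast [List.length_cons]; omega
    have hget : PySem.List.pyGet? (pre ++ l :: nl :: rs) ((pre.length : Int) + 1) = some nl := by
      have : ((pre.length : Int) + 1) = ((pre.length + 1 : Nat) : Int) := by push_cast; ring
      rw [this, PySem.List.pyGet?_natCast]
      rw [List.getElem?_append_right (by omega)]
      simp
    simp only [pvStepA, hguard, and_true, hget, Option.getD_some, pvHeader, List.head?]
    by_cases hr : PySem.Chars.startswith (PySem.Chars.strip l.toList) ['R', 'X', ':'] = true
    · have ht : ¬ PySem.Chars.startswith (PySem.Chars.strip l.toList) ['T', 'X', ':'] = true := by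
        intro ht
        exact pvRX_TX_excl (PySem.Str.strip l) (by simpa using hr) (by simpa using ht)
      by_cases hc : 4 ≤ (PySem.Str.split₀ nl).length
      · simp [hr, ht, hc, pvParse]
      · simp [hr, ht, hc, pvParse]
    · by_cases ht : PySem.Chars.startswith (PySem.Chars.strip l.toList) ['T', 'X', ':'] = true
      · by_cases hc : 4 ≤ (PySem.Str.split₀ nl).length
        · simp [hr, ht, hc, pvParse]
        · simp [hr, ht, hc, pvParse]
      · simp [hr, ht]

theorem pvFoldA_eq (pre suf : List String) (s : Int × Int × Int × Int) :
    ((PySem.List.enumerate suf (pre.length : Int)).foldl (pvStepA (pre ++ suf)) s) = pvRefA suf s := by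
  induction suf generalizing pre s with
  | nil => rfl
  | cons l rest ih =>
    rw [PySem.List.enumerate_cons, List.foldl_cons, pvStepA_eq]
    have h1 : pre ++ l :: rest = (pre ++ [l]) ++ rest := by simp
    have h2 : (pre.length : Int) + 1 = ((pre ++ [l]).length : Int) := by simp
    rw [h1, h2, ih]
    rfl

-- step over a (header, following-line) pair
def pvStepPair (s : Int × Int × Int × Int) (p : String × String) : Int × Int × Int × Int :=
  match pvHeader p.1 with
  | some q => pvParse s q p.2
  | none => s

theorem pvRefA_eq_foldPairs (ls : List String) (s : Int × Int × Int × Int) :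
    pvRefA ls s = (ls.zip ls.tail).foldl pvStepPair s := by
  induction ls generalizing s with
  | nil => rfl
  | cons l rest ih =>
    cases rest with
    | nil =>
      simp only [pvRefA, List.head?, List.tail, List.zip_nil_right]
      cases h : pvHeader l <;> rfl
    | cons nl rs =>
      show pvRefA (nl :: rs) _ = _
      rw [ih]
      simp only [List.tail_cons, List.zip_cons_cons, List.foldl_cons, pvStepPair, List.head?]
      cases h : pvHeader l <;> rfl

def pvIsCand (tag : String) (p : String × String) : Bool :=
  PySem.Str.startswith (PySem.Str.strip p.1) tag && decide (4 ≤ (PySem.Str.split₀ p.2).length)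

def pvPair (nl : String) : Int × Int :=
  ((PySem.Int.ofStr? ((PySem.List.pyGet? (PySem.Str.split₀ nl) 2).getD "")).getD 0,
   (PySem.Int.ofStr? ((PySem.List.pyGet? (PySem.Str.split₀ nl) 3).getD "")).getD 0)

theorem pvFold_rx (pairs : List (String × String)) (s : Int × Int × Int × Int) :
    ((pairs.foldl pvStepPair s).1, (pairs.foldl pvStepPair s).2.1) =
      (match (pairs.filter (pvIsCand "RX:")).getLast? with
       | some p => pvPair p.2
       | none => (s.1, s.2.1)) := by
  induction pairs generalizing s with
  | nil => rfl
  | cons p ps ih =>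
    rw [List.foldl_cons, ih]
    by_cases hc : pvIsCand "RX:" p = true
    · have hc' : PySem.Str.startswith (PySem.Str.strip p.1) "RX:" = true ∧
          4 ≤ (PySem.Str.split₀ p.2).length := by
        have h := hc
        simp only [pvIsCand, Bool.and_eq_true, decide_eq_true_eq] at h
        exact h
      have hrx : PySem.Str.startswith (PySem.Str.strip p.1) "RX:" = true := hc'.1
      have hlen : 4 ≤ (PySem.Str.split₀ p.2).length := hc'.2
      have hstep : pvStepPair s p = ((pvPair p.2).1, (pvPair p.2).2, s.2.2.1, s.2.2.2) := by
        unfold pvStepPair pvHeader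
        rw [if_pos hrx]
        simp [pvParse, hlen, pvPair]
      rw [List.filter_cons_of_pos hc]
      cases he : ps.filter (pvIsCand "RX:") with
      | nil =>
        simp only [List.getLast?_nil, List.getLast?_singleton]
        rw [hstep]
      | cons x xs =>
        rw [List.getLast?_cons_cons]
        cases h2 : (x :: xs).getLast? with
        | some q => rfl
        | none => simp [List.getLast?_eq_none_iff] at h2
    · rw [List.filter_cons_of_neg hc]
      have hns : ¬ (PySem.Str.startswith (PySem.Str.strip p.1) "RX:" = true ∧
          4 ≤ (PySem.Str.split₀ p.2).length) := by
        intro ⟨h1, h2⟩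
        exact hc (by rw [pvIsCand, h1, decide_eq_true h2]; rfl)
      have hkeep : ((pvStepPair s p).1, (pvStepPair s p).2.1) = (s.1, s.2.1) := by
        unfold pvStepPair pvHeader
        by_cases hr : PySem.Str.startswith (PySem.Str.strip p.1) "RX:" = true
        · have hl : ¬ 4 ≤ (PySem.Str.split₀ p.2).length := fun h => hns ⟨hr, h⟩
          rw [if_pos hr]
          simp [pvParse, hl]
        · rw [if_neg hr]
          by_cases ht : PySem.Str.startswith (PySem.Str.strip p.1) "TX:" = true
          · rw [if_pos ht]
            simp only [pvParse]
            split
            · rfl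
            · rfl
          · rw [if_neg ht]
      cases hps : (ps.filter (pvIsCand "RX:")).getLast? <;> rw [hkeep]

theorem pvFold_tx (pairs : List (String × String)) (s : Int × Int × Int × Int) :
    ((pairs.foldl pvStepPair s).2.2.1, (pairs.foldl pvStepPair s).2.2.2) =
      (match (pairs.filter (pvIsCand "TX:")).getLast? with
       | some p => pvPair p.2
       | none => (s.2.2.1, s.2.2.2)) := by
  induction pairs generalizing s with
  | nil => rfl
  | cons p ps ih =>
    rw [List.foldl_cons, ih]
    by_cases hc : pvIsCand "TX:" p = true
    · have hc' : PySem.Str.startswith (PySem.Str.strip p.1) "TX:" = true ∧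
          4 ≤ (PySem.Str.split₀ p.2).length := by
        have h := hc
        simp only [pvIsCand, Bool.and_eq_true, decide_eq_true_eq] at h
        exact h
      have htx : PySem.Str.startswith (PySem.Str.strip p.1) "TX:" = true := hc'.1
      have hlen : 4 ≤ (PySem.Str.split₀ p.2).length := hc'.2
      have hrx : ¬ PySem.Str.startswith (PySem.Str.strip p.1) "RX:" = true := by
        intro hr; exact pvRX_TX_excl _ hr htx
      have hstep : pvStepPair s p = (s.1, s.2.1, (pvPair p.2).1, (pvPair p.2).2) := by
        unfold pvStepPair pvHeader
        rw [if_neg hrx, if_pos htx]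
        simp [pvParse, hlen, pvPair]
      rw [List.filter_cons_of_pos hc]
      cases he : ps.filter (pvIsCand "TX:") with
      | nil =>
        simp only [List.getLast?_nil, List.getLast?_singleton]
        rw [hstep]
      | cons x xs =>
        rw [List.getLast?_cons_cons]
        cases h2 : (x :: xs).getLast? with
        | some q => rfl
        | none => simp [List.getLast?_eq_none_iff] at h2
    · rw [List.filter_cons_of_neg hc]
      have hns : ¬ (PySem.Str.startswith (PySem.Str.strip p.1) "TX:" = true ∧
          4 ≤ (PySem.Str.split₀ p.2).length) := by
        intro ⟨h1, h2⟩
        exact hc (by rw [pvIsCand, h1, decide_eq_true h2]; rfl)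
      have hkeep : ((pvStepPair s p).2.2.1, (pvStepPair s p).2.2.2) = (s.2.2.1, s.2.2.2) := by
        unfold pvStepPair pvHeader
        by_cases ht : PySem.Str.startswith (PySem.Str.strip p.1) "TX:" = true
        · have hl : ¬ 4 ≤ (PySem.Str.split₀ p.2).length := fun h => hns ⟨ht, h⟩
          have hr : ¬ PySem.Str.startswith (PySem.Str.strip p.1) "RX:" = true := by
            intro hr; exact pvRX_TX_excl _ hr ht
          rw [if_neg hr, if_pos ht]
          simp [pvParse, hl]
        · by_cases hr : PySem.Str.startswith (PySem.Str.strip p.1) "RX:" = true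
          · rw [if_pos hr]
            simp only [pvParse]
            split
            · rfl
            · rfl
          · rw [if_neg hr, if_neg ht]
      cases hps : (ps.filter (pvIsCand "TX:")).getLast? <;> rw [hkeep]

theorem pvLastStats_eq (pairs : List (String × String)) (tag : String) :
    pvLastStats pairs tag =
      (match (pairs.filter (pvIsCand tag)).getLast? with
       | some p => pvPair p.2
       | none => (0, 0)) := by
  show (match ((pairs.filter (pvIsCand tag)).map (fun p => PySem.Str.split₀ p.2)).getLast? with
        | some nums =>
            ((PySem.Int.ofStr? ((PySem.List.pyGet? nums 2).getD "")).getD 0,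
             (PySem.Int.ofStr? ((PySem.List.pyGet? nums 3).getD "")).getD 0)
        | none => ((0 : Int), (0 : Int))) = _
  rw [List.getLast?_map]
  cases (pairs.filter (pvIsCand tag)).getLast? <;> rfl

theorem pv_zip_tail (ls : List String) :
    ls.zip (PySem.List.slice ls (some 1) none) = ls.zip ls.tail := by
  rw [PySem.List.slice_from_one]

-- ===== VERDICT (by name: the statement is the Claim_ definition above) =====
theorem parse_ip_link_stats_py_spec : Claim_equal_parse_ip_link_stats_py := by
  intro text _ _
  unfold Spec_parse_ip_link_stats_py parse_ip_link_stats_py parse_ip_link_stats_py_alt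
  show ([("rx_errors", ((PySem.List.enumerate (PySem.Str.splitlines text) 0).foldl
            (pvStepA (PySem.Str.splitlines text)) (0, 0, 0, 0)).1),
        ("rx_dropped", ((PySem.List.enumerate (PySem.Str.splitlines text) 0).foldl
            (pvStepA (PySem.Str.splitlines text)) (0, 0, 0, 0)).2.1),
        ("tx_errors", ((PySem.List.enumerate (PySem.Str.splitlines text) 0).foldl
            (pvStepA (PySem.Str.splitlines text)) (0, 0, 0, 0)).2.2.1),
        ("tx_dropped", ((PySem.List.enumerate (PySem.Str.splitlines text) 0).foldl
            (pvStepA (PySem.Str.splitlines text)) (0, 0, 0, 0)).2.2.2)] : List (String × Int)) =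
      [("rx_errors", (pvLastStats ((PySem.Str.splitlines text).zip
          (PySem.List.slice (PySem.Str.splitlines text) (some 1) none)) "RX:").1),
       ("rx_dropped", (pvLastStats ((PySem.Str.splitlines text).zip
          (PySem.List.slice (PySem.Str.splitlines text) (some 1) none)) "RX:").2),
       ("tx_errors", (pvLastStats ((PySem.Str.splitlines text).zip
          (PySem.List.slice (PySem.Str.splitlines text) (some 1) none)) "TX:").1),
       ("tx_dropped", (pvLastStats ((PySem.Str.splitlines text).zip
          (PySem.List.slice (PySem.Str.splitlines text) (some 1) none)) "TX:").2)]
  have hA := pvFoldA_eq [] (PySem.Str.splitlines text) (0, 0, 0, 0)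
  simp only [List.nil_append, List.length_nil, Nat.cast_zero] at hA
  rw [hA, pvRefA_eq_foldPairs]
  rw [pv_zip_tail]
  have hrx := pvFold_rx ((PySem.Str.splitlines text).zip (PySem.Str.splitlines text).tail) (0, 0, 0, 0)
  have htx := pvFold_tx ((PySem.Str.splitlines text).zip (PySem.Str.splitlines text).tail) (0, 0, 0, 0)
  rw [pvLastStats_eq, pvLastStats_eq]
  have h1 := congrArg Prod.fst hrx
  have h2 := congrArg Prod.snd hrx
  have h3 := congrArg Prod.fst htx
  have h4 := congrArg Prod.snd htx
  simp only at h1 h2 h3 h4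
  rw [h1, h2, h3, h4]
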